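-- pv_equiv track=rewrite | github.com/leechristie/seeded-metric-problem | coherence/kendalltau_adjust.py | kendalltau_adjust
-- ===== SOURCE A (Python) =====
-- def kendalltau_adjust(candidate, seeds, i):
--     x_i, x_j = candidate[i:i+2]
--     rv = [0] * len(seeds)
--     for seed_id in range(len(seeds)):
--         seed = seeds[seed_id]
--         for e in seed:
--             if e == x_i:
--                 rv[seed_id] = 1
--                 break
--             elif e == x_j:
--                 rv[seed_id] = -1
--                 break
--         else:
--              raise ValueError("did not find " + str(x_i) + " or " + str(x_j) + " in " + str(seed))
--     return rv
-- ===== SOURCE B (Python) =====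
-- def kendalltau_adjust(candidate, seeds, i):
--     x_i, x_j = candidate[i:i+2]
--     rv = []
--     for seed in seeds:
--         try:
--             pi = seed.index(x_i)
--         except ValueError:
--             pi = None
--         try:
--             pj = seed.index(x_j)
--         except ValueError:
--             pj = None
--         if pi is None and pj is None:
--             raise ValueError("did not find " + str(x_i) + " or " + str(x_j) + " in " + str(seed))
--         rv.append(1 if pj is None or (pi is not None and pi <= pj) else -1)
--     return rv
-- ===== Notes on version B (the rewrite author's own statement) =====
-- stated objective: alternative
-- what changed: Per seed, the single early-break scan deciding which of x_i/x_j appears first is replaced by two independent first-index lookups (seed.index with try/except) followed by a position comparison with <=.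
import Mathlib
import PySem

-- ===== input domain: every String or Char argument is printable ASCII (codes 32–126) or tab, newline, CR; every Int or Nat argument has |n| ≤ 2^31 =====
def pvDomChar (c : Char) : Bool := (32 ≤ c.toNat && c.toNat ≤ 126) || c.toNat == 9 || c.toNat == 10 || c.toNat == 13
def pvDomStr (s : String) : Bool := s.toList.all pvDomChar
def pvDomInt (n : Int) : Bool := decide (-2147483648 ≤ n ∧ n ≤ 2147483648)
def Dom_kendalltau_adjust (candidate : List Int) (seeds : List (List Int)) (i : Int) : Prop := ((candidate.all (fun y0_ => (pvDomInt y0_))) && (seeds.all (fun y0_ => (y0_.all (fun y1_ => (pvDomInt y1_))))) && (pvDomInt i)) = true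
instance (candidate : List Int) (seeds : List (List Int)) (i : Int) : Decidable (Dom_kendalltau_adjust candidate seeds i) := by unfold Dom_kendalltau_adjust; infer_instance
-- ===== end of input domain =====

-- B replaces A's single early-break scan per seed with two independent first-index lookups and a position comparison (objective: alternative).


-- ===== PORT A =====
-- A's inner for/else loop: scan the seed, 1 on first x_i, -1 on first x_j; empty suffix = the raise (0 here, excluded by Pre_).
def ktaScanA (xi xj : Int) : List Int → Int
  | [] => 0
  | e :: rest => if e = xi then 1 else if e = xj then -1 else ktaScanA xi xj rest

def kendalltau_adjust (candidate : List Int) (seeds : List (List Int)) (i : Int) : List Int :=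
  match PySem.List.slice candidate (some i) (some (i + 2)) with
  | [xi, xj] => seeds.map (fun seed => ktaScanA xi xj seed)
  | _ => []   -- unpacking raises ValueError; excluded by Pre_

-- ===== PORT B =====
-- B's per-seed decision from the two first positions (none = .index raised); none/none is B's re-raise (0 here, excluded by Pre_).
def ktaJudgeB (pi? pj? : Option Nat) : Int :=
  match pi?, pj? with
  | none, none => 0
  | some _, none => 1
  | none, some _ => -1
  | some a, some b => if a ≤ b then 1 else -1

def kendalltau_adjust_alt (candidate : List Int) (seeds : List (List Int)) (i : Int) : List Int :=
  let sl := PySem.List.slice candidate (some i) (some (i + 2))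
  match PySem.List.pyGet? sl 0, PySem.List.pyGet? sl 1 with
  | some xi, some xj =>
      seeds.map (fun seed => ktaJudgeB (PySem.List.index? seed xi) (PySem.List.index? seed xj))
  | _, _ => []   -- unpacking raises ValueError; excluded by Pre_ (the slice never exceeds 2 elements)

-- ===== PRECONDITION & SPEC =====
-- Pre_ excludes exactly the inputs on which Python A raises ValueError: candidate[i:i+2] must
-- unpack into two values, and every seed must contain at least one of them.
def Pre_kendalltau_adjust (candidate : List Int) (seeds : List (List Int)) (i : Int) : Prop :=
  (PySem.List.slice candidate (some i) (some (i + 2))).length = 2 ∧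
  ∀ seed ∈ seeds, (PySem.List.slice candidate (some i) (some (i + 2))).head! ∈ seed ∨
                  (PySem.List.slice candidate (some i) (some (i + 2))).getLast! ∈ seed
instance (candidate : List Int) (seeds : List (List Int)) (i : Int) : Decidable (Pre_kendalltau_adjust candidate seeds i) := by unfold Pre_kendalltau_adjust; infer_instance

def pvWitness_kendalltau_adjust : List Int × List (List Int) × Int := ([1, 2], [[3, 1], [2, 5]], 0)

def Spec_kendalltau_adjust (candidate : List Int) (seeds : List (List Int)) (i : Int) (out : List Int) : Prop := out = kendalltau_adjust_alt candidate seeds i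
instance (candidate : List Int) (seeds : List (List Int)) (i : Int) (out : List Int) : Decidable (Spec_kendalltau_adjust candidate seeds i out) := by unfold Spec_kendalltau_adjust; infer_instance

-- ===== CLAIM (what is proved, stated in full; the proofs are below) =====
def Claim_equal_kendalltau_adjust : Prop := ∀ (candidate : List Int) (seeds : List (List Int)) (i : Int), Dom_kendalltau_adjust candidate seeds i → Pre_kendalltau_adjust candidate seeds i → Spec_kendalltau_adjust candidate seeds i (kendalltau_adjust candidate seeds i)

-- ===== LEMMAS AND PROOFS =====
theorem ktaJudgeB_some_zero (pj? : Option Nat) : ktaJudgeB (some 0) pj? = 1 := by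
  cases pj? <;> simp [ktaJudgeB]

theorem ktaJudgeB_map_succ_zero (o : Option Nat) : ktaJudgeB (o.map (· + 1)) (some 0) = -1 := by
  cases o <;> simp [ktaJudgeB]

theorem ktaJudgeB_map_succ (o₁ o₂ : Option Nat) :
    ktaJudgeB (o₁.map (· + 1)) (o₂.map (· + 1)) = ktaJudgeB o₁ o₂ := by
  cases o₁ <;> cases o₂ <;> simp [ktaJudgeB]

theorem scanA_eq_judgeB (xi xj : Int) (seed : List Int) :
    ktaScanA xi xj seed = ktaJudgeB (PySem.List.index? seed xi) (PySem.List.index? seed xj) := by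
  induction seed with
  | nil => simp [ktaScanA, ktaJudgeB, PySem.List.index?_eq_idxOf?, List.idxOf?]
  | cons e rest ih =>
    by_cases h1 : e = xi
    · subst h1
      rw [PySem.List.index?_cons_self, ktaJudgeB_some_zero]
      simp [ktaScanA]
    · by_cases h2 : e = xj
      · subst h2
        rw [PySem.List.index?_cons_self, PySem.List.index?_cons_of_ne rest h1,
          ktaJudgeB_map_succ_zero]
        simp [ktaScanA, h1]
      · rw [PySem.List.index?_cons_of_ne rest h1,
          PySem.List.index?_cons_of_ne rest h2, ktaJudgeB_map_succ]
        simpa [ktaScanA, h1, h2] using ih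

theorem slice_two_len_le (xs : List Int) (i : Int) :
    (PySem.List.slice xs (some i) (some (i + 2))).length ≤ 2 := by
  rw [PySem.List.length_slice]
  simp only [PySem.List.clampIdx]
  split_ifs <;> omega

-- ===== VERDICT (by name: the statement is the Claim_ definition above) =====
theorem kendalltau_adjust_spec : Claim_equal_kendalltau_adjust := by
  intro candidate seeds i _ _
  unfold Spec_kendalltau_adjust kendalltau_adjust kendalltau_adjust_alt
  have hlen := slice_two_len_le candidate i
  generalize PySem.List.slice candidate (some i) (some (i + 2)) = sl at hlen ⊢
  rcases sl with _ | ⟨a, _ | ⟨b, _ | ⟨c, t⟩⟩⟩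
  · simp [PySem.List.pyGet?, PySem.List.pyIdx?]
  · simp [PySem.List.pyGet?, PySem.List.pyIdx?]
  · simp [PySem.List.pyGet?, PySem.List.pyIdx?, scanA_eq_judgeB]
  · simp at hlen
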